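-- pv_equiv track=rewrite | github.com/Suntooth/gallifreyan-tools | Spinner Gallifreyan/Efficiency/efficiency.py | units
-- ===== SOURCE A (Python) =====
-- def units(y,word) -> int:
--     word = word.lower()
--
--     if y:
--         word = ["V" if c in "aeiouy" else "C" for c in word]
--     else:
--         word = ["V" if c in "aeiou" else "C" for c in word]
--
--     count = 0
--
--     while word:
--         if ''.join(word[:2]) in ('CV', 'VC'):
--             word.pop(0)
--
--         word.pop(0)
--         count += 1
--
--     return count
-- ===== SOURCE B (Python) =====
-- def units(y, word) -> int:
--     vowels = "aeiouy" if y else "aeiou"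
--     pat = [c in vowels for c in word.lower()]
--     pairs = 0
--     prev_paired = False
--     for a, b in zip(pat, pat[1:]):
--         if a != b and not prev_paired:
--             pairs += 1
--             prev_paired = True
--         else:
--             prev_paired = False
--     return len(pat) - pairs
-- ===== Notes on version B (the rewrite author's own statement) =====
-- stated objective: faster
-- what changed: A repeatedly pops from the front of a list, greedily consuming a differing pair or a single symbol per step; B makes one linear pass over adjacent pairs of the boolean vowel pattern, counts the greedily mergeable differing pairs, and returns length minus that count.
import Mathlib
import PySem

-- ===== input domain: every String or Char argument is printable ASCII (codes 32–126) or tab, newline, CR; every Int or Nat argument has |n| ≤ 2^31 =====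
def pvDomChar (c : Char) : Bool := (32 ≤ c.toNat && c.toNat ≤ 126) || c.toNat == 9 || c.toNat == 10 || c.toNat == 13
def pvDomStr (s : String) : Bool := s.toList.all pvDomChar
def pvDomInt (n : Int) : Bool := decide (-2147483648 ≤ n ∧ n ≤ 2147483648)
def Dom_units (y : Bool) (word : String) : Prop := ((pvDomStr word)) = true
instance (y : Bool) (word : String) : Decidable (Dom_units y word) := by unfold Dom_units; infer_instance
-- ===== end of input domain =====

-- B replaces A's quadratic pop-from-the-front greedy loop by a single linear pass that
-- counts the greedily merged differing adjacent pairs and subtracts them from the length.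

-- ===== PORT A =====
-- the while loop: pop an extra leading symbol when the first two form 'CV' or 'VC', count each step
def unitsLoop : List Char → Int → Int
  | [], count => count
  | w@(_ :: rest), count =>
      if String.ofList (w.take 2) = "CV" ∨ String.ofList (w.take 2) = "VC" then
        unitsLoop (rest.drop 1) (count + 1)
      else
        unitsLoop rest (count + 1)
  termination_by w _ => w.length
  decreasing_by
    all_goals simp

def units (y : Bool) (word : String) : Int :=
  let w := PySem.Str.lower word
  let pat :=
    if y then
      w.toList.map (fun c => if ("aeiouy".toList).contains c then 'V' else 'C')
    else
      w.toList.map (fun c => if ("aeiou".toList).contains c then 'V' else 'C')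
  unitsLoop pat 0

-- ===== PORT B =====
-- one fold step of the pair-counting pass: state = (pairs so far, previous char consumed as 2nd half of a pair)
def pairStep (st : Int × Bool) (ab : Bool × Bool) : Int × Bool :=
  if ab.1 ≠ ab.2 ∧ st.2 = false then (st.1 + 1, true) else (st.1, false)

def units_alt (y : Bool) (word : String) : Int :=
  let vowels := if y then "aeiouy" else "aeiou"
  let pat := (PySem.Str.lower word).toList.map (fun c => (vowels.toList).contains c)
  let pairs := ((pat.zip (pat.drop 1)).foldl pairStep (0, false)).1
  (pat.length : Int) - pairs

-- ===== PRECONDITION & SPEC =====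
def Spec_units (y : Bool) (word : String) (out : Int) : Prop := out = units_alt y word
instance (y : Bool) (word : String) (out : Int) : Decidable (Spec_units y word out) := by unfold Spec_units; infer_instance

-- ===== CLAIM (what is proved, stated in full; the proofs are below) =====
def Claim_equal_units : Prop := ∀ (y : Bool) (word : String), Dom_units y word → Spec_units y word (units y word)

-- ===== LEMMAS AND PROOFS =====

def enc (b : Bool) : Char := if b then 'V' else 'C'

-- one-step unfolding of A's loop on a nonempty list
theorem unitsLoop_cons (c : Char) (rest : List Char) (count : Int) :
    unitsLoop (c :: rest) count =
      if String.ofList ((c :: rest).take 2) = "CV" ∨ String.ofList ((c :: rest).take 2) = "VC" then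
        unitsLoop (rest.drop 1) (count + 1)
      else
        unitsLoop rest (count + 1) := by
  rw [unitsLoop.eq_def]

def pairsOf (l : List Bool) : Int := ((l.zip (l.drop 1)).foldl pairStep (0, false)).1

-- the counter component of the fold is a running sum: shift lemma
theorem pairStep_shift (es : List (Bool × Bool)) (p : Int) (s : Bool) :
    es.foldl pairStep (p, s) = ((es.foldl pairStep (0, s)).1 + p, (es.foldl pairStep (0, s)).2) := by
  induction es generalizing p s with
  | nil => simp
  | cons e t ih =>
      simp only [List.foldl_cons, pairStep]
      split_ifs with h
      · simp only [zero_add]; rw [ih (p + 1), ih 1]; simp [Prod.ext_iff]; omega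
      · exact ih p false

theorem pairsOf_cons_cons_ne (a b : Bool) (t : List Bool) (h : a ≠ b) :
    pairsOf (a :: b :: t) = 1 + pairsOf t := by
  cases t with
  | nil => simp [pairsOf, pairStep, h]
  | cons c t' =>
      simp only [pairsOf, List.drop, List.zip_cons_cons, List.foldl_cons]
      rw [show pairStep (0, false) (a, b) = (1, true) by simp [pairStep, h]]
      rw [show pairStep (1, true) (b, c) = (1, false) by simp [pairStep]]
      rw [pairStep_shift _ 1 false]
      omega

theorem pairsOf_cons_cons_eq (a : Bool) (t : List Bool) :
    pairsOf (a :: a :: t) = pairsOf (a :: t) := by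
  cases t with
  | nil => simp [pairsOf, pairStep]
  | cons c t' =>
      simp only [pairsOf, List.drop, List.zip_cons_cons, List.foldl_cons]
      rw [show pairStep (0, false) (a, a) = (0, false) by simp [pairStep]]

-- main invariant: A's loop on the encoded pattern computes count + (length - pairs)
theorem loop_eq (l : List Bool) (count : Int) :
    unitsLoop (l.map enc) count = count + ((l.length : Int) - pairsOf l) := by
  match l with
  | [] => simp [unitsLoop, pairsOf]
  | [a] =>
      have : pairsOf [a] = 0 := by simp [pairsOf]
      cases a <;> simp [unitsLoop, enc, this]
  | a :: b :: t =>
      by_cases hab : a = b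
      · subst hab
        have hcond : ¬ (String.ofList ((enc a :: enc a :: t.map enc).take 2) = "CV" ∨
            String.ofList ((enc a :: enc a :: t.map enc).take 2) = "VC") := by
          cases a <;> simp [enc]
        rw [show (a :: a :: t).map enc = enc a :: enc a :: t.map enc by simp]
        rw [unitsLoop_cons, if_neg hcond]
        rw [show (enc a :: t.map enc) = (a :: t).map enc by simp]
        rw [loop_eq (a :: t) (count + 1), pairsOf_cons_cons_eq]
        simp; omega
      · have hcond : (String.ofList ((enc a :: enc b :: t.map enc).take 2) = "CV" ∨
            String.ofList ((enc a :: enc b :: t.map enc).take 2) = "VC") := by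
          cases a <;> cases b <;> simp_all [enc]
        rw [show (a :: b :: t).map enc = enc a :: enc b :: t.map enc by simp]
        rw [unitsLoop_cons, if_pos hcond]
        simp only [List.drop_one, List.tail_cons]
        rw [loop_eq t (count + 1), pairsOf_cons_cons_ne a b t hab]
        simp; omega
  termination_by l.length

-- the two vowel tests build corresponding patterns
theorem pat_map (vs : List Char) (cs : List Char) :
    cs.map (fun c => if vs.contains c then 'V' else 'C')
      = (cs.map (fun c => vs.contains c)).map enc := by
  simp [List.map_map, enc, Function.comp]

-- ===== VERDICT (by name: the statement is the Claim_ definition above) =====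
theorem units_spec : Claim_equal_units := by
  intro y word _
  show units y word = units_alt y word
  unfold units units_alt
  cases y <;>
    simp only [if_true, if_false, Bool.false_eq_true] <;>
    rw [pat_map, loop_eq] <;>
    simp [pairsOf]
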